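-- pv_equiv track=rewrite | github.com/devcube2/backjoon | 프로그래머스/3/77486. 다단계 칫솔 판매/다단계 칫솔 판매.py | solution
-- ===== SOURCE A (Python) =====
-- def solution(enroll, referral, seller, amount):
--     # 이름별 이익량
--     benefits = dict.fromkeys(enroll, 0)
--     # 이름별 추천인
--     enroll_referral = {e: r for e, r in zip(enroll, referral)}
--
--     for s, a in zip(seller, amount):
--         # 본인 이익 계산
--         benefit_to_upstair = a * 100 // 10
--         benefit_to_mine = a * 100 - benefit_to_upstair
--         benefits[s] += benefit_to_mine
--         # 추천인 타면서 이익 계산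
--         while enroll_referral[s] != "-" and benefit_to_upstair > 0:
--             # 아랫 사람에게 전달받은 이익 중 내가 받을 이익
--             benefit_to_mine = benefit_to_upstair - (benefit_to_upstair // 10)
--             # 아랫 사람에게 전달받은 이익 중 다시 윗사람에게 줄 이익
--             benefit_to_upstair = benefit_to_upstair // 10
--             # 추천인의 추천인 찾기 위해 변경
--             s = enroll_referral[s]
--             # 추천인 이익 계산
--             benefits[s] += benefit_to_mine
--
--     return list(benefits.values())
-- ===== SOURCE B (Python) =====
-- def solution(enroll, referral, seller, amount):
--     parent = dict(zip(enroll, referral))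
--
--     def credits(person, money):
--         carry = money // 10
--         if parent[person] != "-" and carry > 0:
--             return [(person, money - carry)] + credits(parent[person], carry)
--         return [(person, money - carry)]
--
--     total = {}
--     for s, a in zip(seller, amount):
--         for p, c in credits(s, a * 100):
--             total[p] = total.get(p, 0) + c
--     return [total.get(e, 0) for e in dict.fromkeys(enroll)]
-- ===== Notes on version B (the rewrite author's own statement) =====
-- stated objective: alternative
-- what changed: Instead of A's destructive while-loop walk that mutates a zero-seeded benefits dict, B computes each sale's credits as a pure recursive list of (person, credit) pairs, tallies them into a fresh dict, and reads totals back in first-occurrence order of enroll.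
-- outside the precondition, e.g. on solution(['a'], ['x'], [], []): A returns [0], B returns [0]; on solution(['a'], [], [], []): A returns [0], B returns [0]; on solution(['a'], ['-'], ['b'], []): A returns [0], B returns [0]
import Mathlib
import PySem

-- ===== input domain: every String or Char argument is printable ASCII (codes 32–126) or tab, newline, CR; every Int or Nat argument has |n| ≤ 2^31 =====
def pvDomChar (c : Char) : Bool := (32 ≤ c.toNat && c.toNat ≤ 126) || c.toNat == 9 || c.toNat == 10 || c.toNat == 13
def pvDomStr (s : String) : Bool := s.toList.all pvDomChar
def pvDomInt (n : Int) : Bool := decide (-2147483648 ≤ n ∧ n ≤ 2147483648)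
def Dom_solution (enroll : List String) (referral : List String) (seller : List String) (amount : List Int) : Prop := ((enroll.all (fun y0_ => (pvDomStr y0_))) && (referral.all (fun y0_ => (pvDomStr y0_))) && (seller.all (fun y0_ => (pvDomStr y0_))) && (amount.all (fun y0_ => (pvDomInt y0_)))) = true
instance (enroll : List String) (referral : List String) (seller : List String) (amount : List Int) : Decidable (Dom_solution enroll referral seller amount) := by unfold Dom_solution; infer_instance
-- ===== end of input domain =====

-- B replaces A's destructive walk up the referral chain (a while loop mutating the
-- benefits dict seeded over enroll) by a pure recursive helper that RETURNS the list of
-- (person, credit) pairs of a sale, tallies all credits into a fresh dict, and reads the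
-- totals back in first-occurrence order of enroll; same asymptotic cost.

-- ===== PORT A =====
-- the 'while enroll_referral[s] != "-" and benefit_to_upstair > 0' loop of A
-- (key lookups use getD; under Pre_solution every looked-up key is present)
def aWhile (ref : PySem.Dict String String) (s : String) (carry : Int)
    (b : PySem.Dict String Int) : PySem.Dict String Int :=
  if h : ref.getD s "-" ≠ "-" ∧ 0 < carry then
    let mine := carry - PySem.Int.floordiv carry 10
    let carry' := PySem.Int.floordiv carry 10
    let s' := ref.getD s "-"
    aWhile ref s' carry' (b.modify s' 0 (· + mine))
  else b
termination_by carry.toNat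
decreasing_by
  have he : PySem.Int.floordiv carry 10 = carry / 10 := PySem.Int.floordiv_eq_ediv_of_pos (by norm_num)
  simp only [he]
  obtain ⟨-, hc⟩ := h
  omega

def solution (enroll : List String) (referral : List String) (seller : List String) (amount : List Int) : List Int :=
  let benefits : PySem.Dict String Int :=
    enroll.foldl (fun d e => d.insert e 0) PySem.Dict.empty
  let enrollReferral : PySem.Dict String String :=
    (enroll.zip referral).foldl (fun d p => d.insert p.1 p.2) PySem.Dict.empty
  let benefits :=
    (seller.zip amount).foldl (fun b p =>
      let up := PySem.Int.floordiv (p.2 * 100) 10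
      let mine := p.2 * 100 - up
      aWhile enrollReferral p.1 up (b.modify p.1 0 (· + mine))) benefits
  benefits.values

-- ===== PORT B =====
-- B's pure helper credits(person, money): the list of (person, credit) pairs of one sale
def bCredits (parent : PySem.Dict String String) (person : String) (money : Int) :
    List (String × Int) :=
  let carry := PySem.Int.floordiv money 10
  if h : parent.getD person "-" ≠ "-" ∧ 0 < carry then
    (person, money - carry) :: bCredits parent (parent.getD person "-") carry
  else [(person, money - carry)]
termination_by money.toNat
decreasing_by
  have he : PySem.Int.floordiv money 10 = money / 10 := PySem.Int.floordiv_eq_ediv_of_pos (by norm_num)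
  simp only [carry, he] at h ⊢
  obtain ⟨-, hc⟩ := h
  omega

def solution_alt (enroll : List String) (referral : List String) (seller : List String) (amount : List Int) : List Int :=
  let parent : PySem.Dict String String :=
    (enroll.zip referral).foldl (fun d p => d.insert p.1 p.2) PySem.Dict.empty
  let total : PySem.Dict String Int :=
    (seller.zip amount).foldl (fun t p =>
      (bCredits parent p.1 (p.2 * 100)).foldl
        (fun t q => t.insert q.1 (t.getD q.1 0 + q.2)) t) PySem.Dict.empty
  (PySem.List.dedup enroll).map (fun e => total.getD e 0)

-- ===== PRECONDITION & SPEC =====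
-- Pre_ excludes inputs on which A's dict lookups raise KeyError (a seller not enrolled,
-- a referral chain leaving enroll, an enrollee without a referral entry); the closed-form
-- condition is slightly stronger than the exact raise set (it ignores zip truncation and
-- referrers the carry never reaches), so a few inputs on which A returns are excluded too.
def Pre_solution (enroll : List String) (referral : List String) (seller : List String) (amount : List Int) : Prop :=
  enroll.length ≤ referral.length ∧
  (∀ x ∈ seller, x ∈ enroll) ∧
  (∀ x ∈ referral, x = "-" ∨ x ∈ enroll)
instance (enroll : List String) (referral : List String) (seller : List String) (amount : List Int) : Decidable (Pre_solution enroll referral seller amount) := by unfold Pre_solution; infer_instance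

def pvWitness_solution : List String × List String × List String × List Int :=
  (["john", "mary", "edward"], ["-", "john", "mary"], ["edward", "mary"], [10, 5])

def Spec_solution (enroll : List String) (referral : List String) (seller : List String) (amount : List Int) (out : List Int) : Prop := out = solution_alt enroll referral seller amount
instance (enroll : List String) (referral : List String) (seller : List String) (amount : List Int) (out : List Int) : Decidable (Spec_solution enroll referral seller amount out) := by unfold Spec_solution; infer_instance

-- ===== CLAIM (what is proved, stated in full; the proofs are below) =====
def Claim_equal_solution : Prop := ∀ (enroll : List String) (referral : List String) (seller : List String) (amount : List Int), Dom_solution enroll referral seller amount → Pre_solution enroll referral seller amount → Spec_solution enroll referral seller amount (solution enroll referral seller amount)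

-- ===== LEMMAS AND PROOFS =====

-- A's per-sale destructive walk is the modify-fold of B's pure credit list
lemma creditsFold_eq_aWhile (ref : PySem.Dict String String) (person : String) (money : Int)
    (b : PySem.Dict String Int) :
    (bCredits ref person money).foldl (fun b q => b.modify q.1 0 (· + q.2)) b
      = aWhile ref person (PySem.Int.floordiv money 10)
          (b.modify person 0 (· + (money - PySem.Int.floordiv money 10))) := by
  fun_induction bCredits ref person money generalizing b
  case case1 person money carry h ih =>
    rw [aWhile, dif_pos h]
    exact ih _
  case case2 person money carry h =>
    rw [aWhile, dif_neg h]
    rfl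

-- tallying one credit list by modify (into A's seeded dict) and by insert (into B's
-- fresh dict) preserve pointwise-equal getD · 0
lemma creditList_getD_eq (L : List (String × Int)) (dA dB : PySem.Dict String Int)
    (h : ∀ x, dA.getD x 0 = dB.getD x 0) (x : String) :
    (L.foldl (fun b q => b.modify q.1 0 (· + q.2)) dA).getD x 0
      = (L.foldl (fun t q => t.insert q.1 (t.getD q.1 0 + q.2)) dB).getD x 0 := by
  induction L generalizing dA dB
  case nil => exact h x
  case cons q L ih =>
    refine ih _ _ (fun y => ?_)
    rw [PySem.Dict.getD_modify, PySem.Dict.getD_insert]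
    by_cases hy : y = q.1 <;> simp [hy, h]

-- the same, lifted to the fold over all sales
lemma sales_getD_eq (ref : PySem.Dict String String) (sales : List (String × Int))
    (dA dB : PySem.Dict String Int) (h : ∀ x, dA.getD x 0 = dB.getD x 0) (x : String) :
    (sales.foldl (fun b p =>
        (bCredits ref p.1 (p.2 * 100)).foldl (fun b q => b.modify q.1 0 (· + q.2)) b) dA).getD x 0
      = (sales.foldl (fun t p =>
          (bCredits ref p.1 (p.2 * 100)).foldl (fun t q => t.insert q.1 (t.getD q.1 0 + q.2)) t) dB).getD x 0 := by
  induction sales generalizing dA dB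
  case nil => exact h x
  case cons p sales ih =>
    exact ih _ _ (fun y => creditList_getD_eq _ _ _ h y)

-- A's zero-seeded dict reads 0 everywhere
lemma getD_seed_zero (l : List String) (d : PySem.Dict String Int)
    (h : ∀ x, d.getD x (0:Int) = 0) (x : String) :
    (l.foldl (fun d e => d.insert e 0) d).getD x 0 = 0 := by
  induction l generalizing d
  case nil => exact h x
  case cons e l ih =>
    refine ih _ (fun y => ?_)
    rw [PySem.Dict.getD_insert]
    by_cases hy : y = e <;> simp [hy, h]

-- every value looked up in the referrer dict built from enroll.zip referral is "-" or enrolled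
lemma getD_zipfold (E : List String) (pairs : List (String × String)) (d : PySem.Dict String String)
    (hd : ∀ x, d.getD x "-" = "-" ∨ d.getD x "-" ∈ E)
    (hp : ∀ p ∈ pairs, p.2 = "-" ∨ p.2 ∈ E) (x : String) :
    (pairs.foldl (fun d p => d.insert p.1 p.2) d).getD x "-" = "-"
      ∨ (pairs.foldl (fun d p => d.insert p.1 p.2) d).getD x "-" ∈ E := by
  induction pairs generalizing d
  case nil => exact hd x
  case cons p pairs ih =>
    refine ih _ (fun y => ?_) (fun q hq => hp q (by simp [hq]))
    rw [PySem.Dict.getD_insert]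
    by_cases hy : y = p.1
    · simpa [hy] using hp p (by simp)
    · simpa [hy] using hd y

-- every person credited by a sale is the seller himself or an enrolled referrer
lemma bCredits_mem (E : List String) (ref : PySem.Dict String String) (person : String) (money : Int)
    (hr : ∀ x, ref.getD x "-" = "-" ∨ ref.getD x "-" ∈ E) :
    ∀ q ∈ bCredits ref person money, q.1 = person ∨ q.1 ∈ E := by
  fun_induction bCredits ref person money
  case case1 person money carry h ih =>
    intro q hq
    rcases List.mem_cons.mp hq with rfl | hq
    · exact Or.inl rfl
    · refine Or.inr ?_
      rcases ih q hq with heq | hm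
      · rcases hr person with h0 | h0
        · exact absurd h0 h.1
        · rw [heq]; exact h0
      · exact hm
  case case2 person money carry h =>
    intro q hq
    simp only [List.mem_singleton] at hq
    subst hq; exact Or.inl rfl

-- a Set.update by elements already present is a no-op
lemma set_update_of_subset (s : PySem.Set String) (xs : List String)
    (h : ∀ x ∈ xs, x ∈ s) : PySem.Set.update s xs = s := by
  induction xs generalizing s
  case nil => rfl
  case cons x xs ih =>
    rw [PySem.Set.update_cons, PySem.Set.add_of_mem (h x (by simp))]
    exact ih s (fun y hy => h y (by simp [hy]))

-- a nested fold over sales of credit-list folds is one fold over the flattened credits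
lemma foldl_flatMap {α β γ : Type} (g : β → List γ) (f : α → γ → α) (l : List β) (a : α) :
    (l.flatMap g).foldl f a = l.foldl (fun a b => (g b).foldl f a) a := by
  induction l generalizing a
  case nil => rfl
  case cons b l ih => simp [List.flatMap_cons, List.foldl_append, ih]

lemma solution_eq_alt (enroll referral seller : List String) (amount : List Int)
    (hpre : Pre_solution enroll referral seller amount) :
    solution enroll referral seller amount = solution_alt enroll referral seller amount := by
  obtain ⟨hlen, hsell, href⟩ := hpre
  unfold solution solution_alt
  simp only []
  set ref := (enroll.zip referral).foldl (fun d p => d.insert p.1 p.2) PySem.Dict.empty with href_def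
  set seed := enroll.foldl (fun d e => d.insert e 0) (PySem.Dict.empty : PySem.Dict String Int) with hseed
  -- referrer-dict values are "-" or enrolled
  have hr : ∀ x, ref.getD x "-" = "-" ∨ ref.getD x "-" ∈ enroll := by
    intro x
    refine getD_zipfold enroll _ _ (fun y => Or.inl (PySem.Dict.getD_empty _ _)) ?_ x
    intro p hp
    exact href p.2 (List.of_mem_zip hp).2
  -- rewrite A's per-sale step as the modify-fold of B's credit list
  have hstep : (fun (b : PySem.Dict String Int) (p : String × Int) =>
      let up := PySem.Int.floordiv (p.2 * 100) 10
      let mine := p.2 * 100 - up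
      aWhile ref p.1 up (b.modify p.1 0 (· + mine)))
    = (fun b p => (bCredits ref p.1 (p.2 * 100)).foldl (fun b q => b.modify q.1 0 (· + q.2)) b) := by
    funext b p
    exact (creditsFold_eq_aWhile ref p.1 (p.2 * 100) b).symm
  rw [hstep]
  set finalA := (seller.zip amount).foldl
    (fun b p => (bCredits ref p.1 (p.2 * 100)).foldl (fun b q => b.modify q.1 0 (· + q.2)) b) seed
    with hfinalA
  set finalB := (seller.zip amount).foldl
    (fun t p => (bCredits ref p.1 (p.2 * 100)).foldl (fun t q => t.insert q.1 (t.getD q.1 0 + q.2)) t)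
    (PySem.Dict.empty : PySem.Dict String Int) with hfinalB
  -- pointwise agreement of the two tallies
  have hpt : ∀ x, finalA.getD x 0 = finalB.getD x 0 := by
    intro x
    refine sales_getD_eq ref _ _ _ (fun y => ?_) x
    rw [getD_seed_zero enroll _ (fun z => PySem.Dict.getD_empty _ _) y,
        PySem.Dict.getD_empty]
  -- A's final keys are the first occurrences of enroll
  have hseedkeys : seed.keys = PySem.Set.ofList enroll := by
    rw [hseed, PySem.Dict.keys_foldl_insert]
    rfl
  have hkeysA : finalA.keys = PySem.Set.ofList enroll := by
    rw [hfinalA, ← foldl_flatMap (fun p => bCredits ref p.1 (p.2 * 100))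
          (fun b q => b.modify q.1 0 (· + q.2)) (seller.zip amount) seed]
    rw [PySem.Dict.keys_foldl_modify_key, hseedkeys]
    refine set_update_of_subset _ _ ?_
    intro x hx
    rw [PySem.Set.mem_ofList]
    simp only [List.mem_map] at hx
    obtain ⟨q, hq, rfl⟩ := hx
    simp only [List.mem_flatMap] at hq
    obtain ⟨p, hp, hq⟩ := hq
    rcases bCredits_mem enroll ref p.1 (p.2 * 100) hr q hq with heq | hm
    · rw [heq]; exact hsell p.1 (List.of_mem_zip hp).1
    · exact hm
  have hnodup : finalA.keys.Nodup := by
    rw [hkeysA]; exact PySem.Set.nodup_ofList enroll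
  rw [PySem.Dict.values_eq_map_keys finalA hnodup 0, hkeysA,
      PySem.List.dedup_eq_ofList]
  exact List.map_congr_left (fun e _ => hpt e)

-- ===== VERDICT (by name: the statement is the Claim_ definition above) =====
theorem solution_spec : Claim_equal_solution := by
  intro enroll referral seller amount _ hpre
  unfold Spec_solution
  exact solution_eq_alt enroll referral seller amount hpre
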